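-- pv_equiv track=rewrite | github.com/Eneet23/graph_state_generation | functions.py | apply_CNOT
-- ===== SOURCE A (Python) =====
-- def apply_CNOT(n1,n2,stabilizer_generator):
--     stabilizer_generator1 = stabilizer_generator.copy()
--     'Apply CNOT to the n1 and n2 qubit. n1 is the control gate. The numbering starts from 0.'
--     for stab in stabilizer_generator1:
--         m1 = stab[n1]
--         m2 = stab[n2]
--
--         if m1 == 'X':
--             if m2 == 'I':
--                 stab[n1],stab[n2] = 'X','X'
--             elif m2 == 'X':
--                 stab[n1],stab[n2] = 'X','I'
--             elif m2 == 'Y':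
--                 stab[n1],stab[n2] = 'Y','Z'
--             elif m2 == 'Z':
--                 stab[n1],stab[n2] = 'Y','Y'
--         elif m1 == 'Y':
--             if m2 == 'I':
--                 stab[n1],stab[n2] = 'Y','X'
--             elif m2 == 'X':
--                 stab[n1],stab[n2] = 'Y','I'
--             elif m2 == 'Y':
--                 stab[n1],stab[n2] = 'X','Z'
--             elif m2 == 'Z':
--                 stab[n1],stab[n2] = 'X','Y'
--         elif m1 == 'Z':
--             if m2 == 'I':
--                 stab[n1],stab[n2] = 'Z','I'
--             elif m2 == 'X':
--                 stab[n1],stab[n2] = 'Z','X'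
--             elif m2 == 'Y':
--                 stab[n1],stab[n2] = 'I','Y'
--             elif m2 == 'Z':
--                 stab[n1],stab[n2] = 'I','Z'
--         elif m1 == 'I':
--             if m2 == 'I':
--                 stab[n1],stab[n2] = 'I','I'
--             elif m2 =='X':
--                 stab[n1],stab[n2] = 'I','X'
--             elif m2 == 'Y':
--                 stab[n1],stab[n2] = 'Z','Y'
--             elif m2 == 'Z':
--                 stab[n1],stab[n2] = 'Z','Z'
--
--     return stabilizer_generator1
-- ===== SOURCE B (Python) =====
-- _ENC = {'I': (0, 0), 'X': (1, 0), 'Z': (0, 1), 'Y': (1, 1)}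
-- _DEC = {(0, 0): 'I', (1, 0): 'X', (0, 1): 'Z', (1, 1): 'Y'}
--
-- def apply_CNOT(n1, n2, stabilizer_generator):
--     out = stabilizer_generator.copy()
--     for stab in out:
--         p1 = _ENC.get(stab[n1])
--         p2 = _ENC.get(stab[n2])
--         if p1 is None or p2 is None:
--             continue
--         (x1, z1), (x2, z2) = p1, p2
--         stab[n1] = _DEC[(x1, z1 ^ z2)]
--         stab[n2] = _DEC[(x1 ^ x2, z2)]
--     return out
-- ===== Notes on version B (the rewrite author's own statement) =====
-- stated objective: idiomatic
-- what changed: Replaces the 4x4 branch table with the symplectic bit encoding of Paulis (I=(0,0),X=(1,0),Z=(0,1),Y=(1,1)): the CNOT update is two XORs (z1^=z2, x2^=x1) followed by decoding, instead of sixteen hard-coded cases.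
import Mathlib
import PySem

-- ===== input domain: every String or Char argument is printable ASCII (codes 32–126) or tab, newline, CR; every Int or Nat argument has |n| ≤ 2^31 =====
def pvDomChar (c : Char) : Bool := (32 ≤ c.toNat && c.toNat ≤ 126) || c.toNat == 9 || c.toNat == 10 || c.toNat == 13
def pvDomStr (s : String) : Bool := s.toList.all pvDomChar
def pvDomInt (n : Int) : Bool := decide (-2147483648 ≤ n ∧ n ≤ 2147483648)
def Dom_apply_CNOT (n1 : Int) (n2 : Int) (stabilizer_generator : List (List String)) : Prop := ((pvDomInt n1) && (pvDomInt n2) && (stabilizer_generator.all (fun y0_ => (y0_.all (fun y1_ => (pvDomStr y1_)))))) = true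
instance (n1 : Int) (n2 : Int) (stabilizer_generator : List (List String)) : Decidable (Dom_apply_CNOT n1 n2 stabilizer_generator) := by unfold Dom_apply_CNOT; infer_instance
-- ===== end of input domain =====

-- B replaces A's sixteen hard-coded branches by the symplectic bit encoding of the Pauli
-- letters and two XORs (idiomatic, same cost). Equivalence is about the RETURN value:
-- Python A (and B) mutate the shared inner lists of the shallow-copied argument in place.

-- ===== PORT A =====
-- A's per-row body: read m1 = stab[n1], m2 = stab[n2], then the literal if/elif table;
-- the tuple assignment writes index n1 first, then n2 (pySetD; indices in range by Pre_).
def pvStepA (n1 : Int) (n2 : Int) (stab : List String) : List String :=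
  match PySem.List.pyGet? stab n1, PySem.List.pyGet? stab n2 with
  | some m1, some m2 =>
    if m1 = "X" then
      if m2 = "I" then PySem.List.pySetD (PySem.List.pySetD stab n1 "X") n2 "X"
      else if m2 = "X" then PySem.List.pySetD (PySem.List.pySetD stab n1 "X") n2 "I"
      else if m2 = "Y" then PySem.List.pySetD (PySem.List.pySetD stab n1 "Y") n2 "Z"
      else if m2 = "Z" then PySem.List.pySetD (PySem.List.pySetD stab n1 "Y") n2 "Y"
      else stab
    else if m1 = "Y" then
      if m2 = "I" then PySem.List.pySetD (PySem.List.pySetD stab n1 "Y") n2 "X"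
      else if m2 = "X" then PySem.List.pySetD (PySem.List.pySetD stab n1 "Y") n2 "I"
      else if m2 = "Y" then PySem.List.pySetD (PySem.List.pySetD stab n1 "X") n2 "Z"
      else if m2 = "Z" then PySem.List.pySetD (PySem.List.pySetD stab n1 "X") n2 "Y"
      else stab
    else if m1 = "Z" then
      if m2 = "I" then PySem.List.pySetD (PySem.List.pySetD stab n1 "Z") n2 "I"
      else if m2 = "X" then PySem.List.pySetD (PySem.List.pySetD stab n1 "Z") n2 "X"
      else if m2 = "Y" then PySem.List.pySetD (PySem.List.pySetD stab n1 "I") n2 "Y"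
      else if m2 = "Z" then PySem.List.pySetD (PySem.List.pySetD stab n1 "I") n2 "Z"
      else stab
    else if m1 = "I" then
      if m2 = "I" then PySem.List.pySetD (PySem.List.pySetD stab n1 "I") n2 "I"
      else if m2 = "X" then PySem.List.pySetD (PySem.List.pySetD stab n1 "I") n2 "X"
      else if m2 = "Y" then PySem.List.pySetD (PySem.List.pySetD stab n1 "Z") n2 "Y"
      else if m2 = "Z" then PySem.List.pySetD (PySem.List.pySetD stab n1 "Z") n2 "Z"
      else stab
    else stab
  | _, _ => stab

def apply_CNOT (n1 : Int) (n2 : Int) (stabilizer_generator : List (List String)) : List (List String) :=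
  stabilizer_generator.map (pvStepA n1 n2)

-- ===== PORT B =====
-- _ENC / _DEC of Source B: Pauli letter ↔ (x, z) bit pair
def pvEnc (s : String) : Option (Bool × Bool) :=
  if s = "I" then some (false, false)
  else if s = "X" then some (true, false)
  else if s = "Z" then some (false, true)
  else if s = "Y" then some (true, true)
  else none

def pvDec : Bool × Bool → String
  | (false, false) => "I"
  | (true, false) => "X"
  | (false, true) => "Z"
  | (true, true) => "Y"

def pvStepB (n1 : Int) (n2 : Int) (stab : List String) : List String :=
  match PySem.List.pyGet? stab n1, PySem.List.pyGet? stab n2 with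
  | some m1, some m2 =>
    match pvEnc m1, pvEnc m2 with
    | some (x1, z1), some (x2, z2) =>
        PySem.List.pySetD (PySem.List.pySetD stab n1 (pvDec (x1, xor z1 z2))) n2 (pvDec (xor x1 x2, z2))
    | _, _ => stab
  | _, _ => stab

def apply_CNOT_alt (n1 : Int) (n2 : Int) (stabilizer_generator : List (List String)) : List (List String) :=
  stabilizer_generator.map (pvStepB n1 n2)

-- ===== PRECONDITION & SPEC =====
-- Pre_ excludes exactly the inputs where Python A raises IndexError: some row on which
-- stab[n1] or stab[n2] is out of range.
def Pre_apply_CNOT (n1 : Int) (n2 : Int) (stabilizer_generator : List (List String)) : Prop :=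
  ∀ stab ∈ stabilizer_generator,
    PySem.Raise.InRange stab.length n1 ∧ PySem.Raise.InRange stab.length n2
instance (n1 : Int) (n2 : Int) (stabilizer_generator : List (List String)) : Decidable (Pre_apply_CNOT n1 n2 stabilizer_generator) := by unfold Pre_apply_CNOT; infer_instance

def pvWitness_apply_CNOT : Int × Int × List (List String) := (0, 1, [["X", "I"], ["Z", "Y"]])

def Spec_apply_CNOT (n1 : Int) (n2 : Int) (stabilizer_generator : List (List String)) (out : List (List String)) : Prop := out = apply_CNOT_alt n1 n2 stabilizer_generator
instance (n1 : Int) (n2 : Int) (stabilizer_generator : List (List String)) (out : List (List String)) : Decidable (Spec_apply_CNOT n1 n2 stabilizer_generator out) := by unfold Spec_apply_CNOT; infer_instance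

-- ===== CLAIM (what is proved, stated in full; the proofs are below) =====
def Claim_equal_apply_CNOT : Prop := ∀ (n1 : Int) (n2 : Int) (stabilizer_generator : List (List String)), Dom_apply_CNOT n1 n2 stabilizer_generator → Pre_apply_CNOT n1 n2 stabilizer_generator → Spec_apply_CNOT n1 n2 stabilizer_generator (apply_CNOT n1 n2 stabilizer_generator)

-- ===== LEMMAS AND PROOFS =====
theorem pvStep_eq (n1 n2 : Int) (stab : List String) : pvStepA n1 n2 stab = pvStepB n1 n2 stab := by
  unfold pvStepA pvStepB
  cases PySem.List.pyGet? stab n1 with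
  | none => rfl
  | some m1 =>
    cases PySem.List.pyGet? stab n2 with
    | none => rfl
    | some m2 =>
      simp only []
      by_cases h1I : m1 = "I" <;> by_cases h1X : m1 = "X" <;>
        by_cases h1Z : m1 = "Z" <;> by_cases h1Y : m1 = "Y" <;>
        by_cases h2I : m2 = "I" <;> by_cases h2X : m2 = "X" <;>
        by_cases h2Z : m2 = "Z" <;> by_cases h2Y : m2 = "Y" <;>
        simp_all [pvEnc, pvDec]

-- ===== VERDICT (by name: the statement is the Claim_ definition above) =====
theorem apply_CNOT_spec : Claim_equal_apply_CNOT := by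
  intro n1 n2 sg _ _
  show apply_CNOT n1 n2 sg = apply_CNOT_alt n1 n2 sg
  unfold apply_CNOT apply_CNOT_alt
  exact List.map_congr_left fun stab _ => pvStep_eq n1 n2 stab
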